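-- pv_equiv track=rewrite | github.com/YuvrajLamba01/CityNexus | src/citynexus/agents/observability.py | _disc_cells
-- ===== SOURCE A (Python) =====
-- Coord = tuple[int, int]
--
-- def _disc_cells(center: Coord, radius: int, w: int, h: int) -> set[Coord]:
--     """Manhattan disc clipped to the grid."""
--     cx, cy = center
--     out: set[Coord] = set()
--     for dy in range(-radius, radius + 1):
--         for dx in range(-radius, radius + 1):
--             if abs(dx) + abs(dy) <= radius:
--                 x, y = cx + dx, cy + dy
--                 if 0 <= x < w and 0 <= y < h:
--                     out.add((x, y))
--     return out
-- ===== SOURCE B (Python) =====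
-- def _disc_cells(center, radius, w, h):
--     """Manhattan disc clipped to the grid, built row by row."""
--     cx, cy = center
--     out = set()
--     for y in range(max(0, cy - radius), min(h, cy + radius + 1)):
--         rem = radius - abs(y - cy)
--         for x in range(max(0, cx - rem), min(w, cx + rem + 1)):
--             out.add((x, y))
--     return out
-- ===== Notes on version B (the rewrite author's own statement) =====
-- stated objective: alternative
-- what changed: B computes the diamond row by row: for each grid-clipped y it derives the remaining Manhattan budget and emits the clipped contiguous x-interval directly, instead of scanning the whole (2r+1)^2 bounding box and filtering each cell with an abs test and bounds check.
import Mathlib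
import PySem

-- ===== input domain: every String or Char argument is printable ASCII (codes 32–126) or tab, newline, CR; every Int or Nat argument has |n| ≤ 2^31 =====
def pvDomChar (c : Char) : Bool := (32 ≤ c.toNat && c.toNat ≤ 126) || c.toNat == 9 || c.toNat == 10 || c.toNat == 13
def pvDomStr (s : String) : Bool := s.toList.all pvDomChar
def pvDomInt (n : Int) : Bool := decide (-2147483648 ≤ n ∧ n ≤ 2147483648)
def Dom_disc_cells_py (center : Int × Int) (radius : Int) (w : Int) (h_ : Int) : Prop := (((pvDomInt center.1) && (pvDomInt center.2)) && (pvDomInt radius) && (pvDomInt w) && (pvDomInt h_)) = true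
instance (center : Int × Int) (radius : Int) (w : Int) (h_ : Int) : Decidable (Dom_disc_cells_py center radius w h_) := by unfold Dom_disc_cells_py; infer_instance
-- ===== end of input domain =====

-- B builds the Manhattan diamond row by row from clipped x-intervals instead of filtering every cell of the bounding box.

-- ===== PORT A =====
def disc_cells_py (center : Int × Int) (radius : Int) (w : Int) (h_ : Int) : List (Int × Int) :=
  let cx := center.1
  let cy := center.2
  (PySem.List.pyRange (-radius) (radius + 1) 1).foldl (fun out dy =>
    (PySem.List.pyRange (-radius) (radius + 1) 1).foldl (fun out dx =>
      if |dx| + |dy| ≤ radius then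
        let x := cx + dx
        let y := cy + dy
        if 0 ≤ x ∧ x < w ∧ 0 ≤ y ∧ y < h_ then PySem.Set.add out (x, y) else out
      else out) out) PySem.Set.empty

-- ===== PORT B =====
def disc_cells_py_alt (center : Int × Int) (radius : Int) (w : Int) (h_ : Int) : List (Int × Int) :=
  let cx := center.1
  let cy := center.2
  (PySem.List.pyRange (max 0 (cy - radius)) (min h_ (cy + radius + 1)) 1).foldl (fun out y =>
    let rem := radius - |y - cy|
    (PySem.List.pyRange (max 0 (cx - rem)) (min w (cx + rem + 1)) 1).foldl (fun out x =>
      PySem.Set.add out (x, y)) out) PySem.Set.empty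

-- ===== PRECONDITION & SPEC =====
def Spec_disc_cells_py (center : Int × Int) (radius : Int) (w : Int) (h_ : Int) (out : List (Int × Int)) : Prop := out = disc_cells_py_alt center radius w h_
instance (center : Int × Int) (radius : Int) (w : Int) (h_ : Int) (out : List (Int × Int)) : Decidable (Spec_disc_cells_py center radius w h_ out) := by unfold Spec_disc_cells_py; infer_instance

-- ===== CLAIM (what is proved, stated in full; the proofs are below) =====
def Claim_equal_disc_cells_py : Prop := ∀ (center : Int × Int) (radius : Int) (w : Int) (h_ : Int), Dom_disc_cells_py center radius w h_ → Spec_disc_cells_py center radius w h_ (disc_cells_py center radius w h_)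

-- ===== LEMMAS AND PROOFS =====

-- two strictly increasing Int lists with the same members are equal
theorem pvSortedExt : ∀ {l1 l2 : List Int}, l1.Pairwise (· < ·) → l2.Pairwise (· < ·) →
    (∀ x, x ∈ l1 ↔ x ∈ l2) → l1 = l2 := by
  intro l1
  induction l1 with
  | nil =>
    intro l2 _ _ hmem
    cases l2 with
    | nil => rfl
    | cons b t2 => exact absurd ((hmem b).2 (List.mem_cons_self)) (List.not_mem_nil)
  | cons a t1 ih =>
    intro l2 h1 h2 hmem
    cases l2 with
    | nil => exact absurd ((hmem a).1 (List.mem_cons_self)) (List.not_mem_nil)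
    | cons b t2 =>
      have hab : a = b := by
        rcases List.mem_cons.1 ((hmem a).1 (List.mem_cons_self)) with h | h
        · exact h
        · rcases List.mem_cons.1 ((hmem b).2 (List.mem_cons_self)) with h' | h'
          · exact h'.symm
          · have := (List.pairwise_cons.1 h1).1 b h'
            have := (List.pairwise_cons.1 h2).1 a h
            omega
      subst hab
      have htail : ∀ x, x ∈ t1 ↔ x ∈ t2 := by
        intro x
        constructor
        · intro hx
          have hax : a < x := (List.pairwise_cons.1 h1).1 x hx
          rcases List.mem_cons.1 ((hmem x).1 (List.mem_cons_of_mem _ hx)) with h | h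
          · omega
          · exact h
        · intro hx
          have hax : a < x := (List.pairwise_cons.1 h2).1 x hx
          rcases List.mem_cons.1 ((hmem x).2 (List.mem_cons_of_mem _ hx)) with h | h
          · omega
          · exact h
      exact congrArg (a :: ·) (ih (List.pairwise_cons.1 h1).2 (List.pairwise_cons.1 h2).2 htail)

-- filtering an Int range by an interval condition is a clipped range
theorem pvFilterRange (a b c d : Int) (p : Int → Bool) (hp : ∀ x, p x = true ↔ c ≤ x ∧ x < d) :
    (PySem.List.pyRange a b 1).filter p = PySem.List.pyRange (max a c) (min b d) 1 := by
  apply pvSortedExt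
  · exact (PySem.List.pairwise_lt_pyRange_one a b).filter p
  · exact PySem.List.pairwise_lt_pyRange_one _ _
  · intro x
    simp only [List.mem_filter, PySem.List.mem_pyRange_one, hp]
    omega

-- shifting a range
theorem pvShiftRange (cx a b : Int) :
    (PySem.List.pyRange a b 1).map (fun k => cx + k) = PySem.List.pyRange (cx + a) (cx + b) 1 := by
  apply pvSortedExt
  · refine List.pairwise_map.2 ?_
    exact (PySem.List.pairwise_lt_pyRange_one a b).imp (by omega)
  · exact PySem.List.pairwise_lt_pyRange_one _ _
  · intro x
    simp only [List.mem_map, PySem.List.mem_pyRange_one]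
    constructor
    · rintro ⟨k, hk, rfl⟩; omega
    · intro hx; exact ⟨x - cx, by omega, by omega⟩

-- G0: fold with a guarded Set.add is a fold of Set.add over the filtered mapped list
theorem pvFoldIf {α β : Type} [BEq α] (p : β → Bool) (f : β → α) :
    ∀ (l : List β) (s : List α),
      l.foldl (fun s x => if p x then PySem.Set.add s (f x) else s) s
        = ((l.filter p).map f).foldl PySem.Set.add s := by
  intro l
  induction l with
  | nil => intro s; rfl
  | cons x t ih =>
    intro s
    by_cases h : p x = true
    · simp [h, ih]
    · simp [h, ih]

-- G1: folding Set.add over a fresh Nodup list appends it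
theorem pvFoldAddFresh {α : Type} [BEq α] [LawfulBEq α] :
    ∀ (l s : List α), l.Nodup → (∀ a ∈ l, a ∉ s) → l.foldl PySem.Set.add s = s ++ l := by
  intro l
  induction l with
  | nil => intro s _ _; simp
  | cons a t ih =>
    intro s hnd hfresh
    simp only [List.foldl_cons]
    rw [PySem.Set.add_of_not_mem (hfresh a List.mem_cons_self)]
    rw [ih (s ++ [a]) (List.nodup_cons.1 hnd).2 ?_]
    · simp
    · intro b hb
      simp only [List.mem_append, List.mem_singleton, not_or]
      exact ⟨hfresh b (List.mem_cons_of_mem _ hb), fun e => (List.nodup_cons.1 hnd).1 (e ▸ hb)⟩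

-- G2: nested fold of Set.add over rows equals the flatMap, when the flatMap is fresh and Nodup
theorem pvFoldRows {α β : Type} [BEq α] [LawfulBEq α] (row : β → List α) :
    ∀ (ys : List β) (s : List α), (ys.flatMap row).Nodup → (∀ a ∈ ys.flatMap row, a ∉ s) →
      ys.foldl (fun s y => (row y).foldl PySem.Set.add s) s = s ++ ys.flatMap row := by
  intro ys
  induction ys with
  | nil => intro s _ _; simp
  | cons y t ih =>
    intro s hnd hfresh
    simp only [List.flatMap_cons] at hnd hfresh ⊢
    have hnd1 : (row y).Nodup := (List.nodup_append.1 hnd).1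
    have hnd2 : (t.flatMap row).Nodup := (List.nodup_append.1 hnd).2.1
    have hdisj := (List.nodup_append.1 hnd).2.2
    simp only [List.foldl_cons]
    rw [pvFoldAddFresh (row y) s hnd1 (fun a ha => hfresh a (List.mem_append_left _ ha))]
    rw [ih (s ++ row y) hnd2 ?_]
    · simp
    · intro a ha
      simp only [List.mem_append, not_or]
      refine ⟨fun h => hfresh a (List.mem_append_right _ ha) h, fun h => hdisj a h a ha rfl⟩

-- a row of cells at height y
def pvRow (cx cy radius w : Int) (y : Int) : List (Int × Int) :=
  (PySem.List.pyRange (max 0 (cx - (radius - |y - cy|))) (min w (cx + (radius - |y - cy|) + 1)) 1).map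
    (fun x => (x, y))

-- A's inner loop result for a given dy, as a list
theorem pvRowA (cx cy radius w h_ dy : Int) :
    ((PySem.List.pyRange (-radius) (radius + 1) 1).filter
        (fun dx => decide (|dx| + |dy| ≤ radius ∧ 0 ≤ cx + dx ∧ cx + dx < w ∧ 0 ≤ cy + dy ∧ cy + dy < h_))).map
        (fun dx => (cx + dx, cy + dy))
      = if 0 ≤ cy + dy ∧ cy + dy < h_ then pvRow cx cy radius w (cy + dy) else [] := by
  by_cases hy : 0 ≤ cy + dy ∧ cy + dy < h_
  · rw [if_pos hy]
    unfold pvRow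
    have habs : |cy + dy - cy| = |dy| := by congr 1; omega
    rw [habs]
    have hfilter : (PySem.List.pyRange (-radius) (radius + 1) 1).filter
        (fun dx => decide (|dx| + |dy| ≤ radius ∧ 0 ≤ cx + dx ∧ cx + dx < w ∧ 0 ≤ cy + dy ∧ cy + dy < h_))
        = PySem.List.pyRange (max (-radius) (max (-(radius - |dy|)) (-cx)))
            (min (radius + 1) (min (radius - |dy| + 1) (w - cx))) 1 := by
      apply pvFilterRange
      intro x
      simp only [decide_eq_true_eq, abs_eq_max_neg]
      omega
    rw [hfilter]
    have hmap : ∀ (l : List Int), l.map (fun dx => (cx + dx, cy + dy))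
        = (l.map (fun dx => cx + dx)).map (fun x => (x, cy + dy)) := by
      intro l; rw [List.map_map]; rfl
    rw [hmap, pvShiftRange]
    have e1 : cx + max (-radius) (max (-(radius - |dy|)) (-cx)) = max 0 (cx - (radius - |dy|)) := by
      simp only [abs_eq_max_neg]; omega
    have e2 : cx + min (radius + 1) (min (radius - |dy| + 1) (w - cx)) = min w (cx + (radius - |dy|) + 1) := by
      simp only [abs_eq_max_neg]; omega
    rw [e1, e2]
  · rw [if_neg hy]
    simp only [List.map_eq_nil_iff, List.filter_eq_nil_iff]
    intro dx _
    simp only [decide_eq_true_eq]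
    tauto

-- rows are Nodup and pinned to their height, so the flatMap over distinct heights is Nodup
theorem pvFlatMapNodup (row : Int → List (Int × Int))
    (hrow : ∀ y, (row y).Nodup) (hpin : ∀ y p, p ∈ row y → p.2 = y) :
    ∀ ys : List Int, ys.Nodup → (ys.flatMap row).Nodup := by
  intro ys
  induction ys with
  | nil => intro _; simp
  | cons y t ih =>
    intro hnd
    simp only [List.flatMap_cons]
    rw [List.nodup_append]
    refine ⟨hrow y, ih (List.nodup_cons.1 hnd).2, ?_⟩
    intro p hp q hq hpq
    subst hpq
    rcases List.mem_flatMap.1 hq with ⟨y', hy', hq'⟩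
    have e1 := hpin y p hp
    have e2 := hpin y' p hq'
    refine (List.nodup_cons.1 hnd).1 ?_
    rw [← e1, e2]
    exact hy'

theorem pvRowNodup (cx cy radius w y : Int) : (pvRow cx cy radius w y).Nodup := by
  unfold pvRow
  refine List.Nodup.map ?_ (PySem.List.nodup_pyRange_one _ _)
  intro a b h
  simpa using congrArg Prod.fst h

theorem pvRowPin (cx cy radius w y : Int) : ∀ p ∈ pvRow cx cy radius w y, p.2 = y := by
  intro p hp
  rcases List.mem_map.1 hp with ⟨x, _, rfl⟩
  rfl

-- flatMap over the full dy-range equals flatMap of pvRow over the clipped y-range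
theorem pvFlatMapEq (cx cy radius w h_ : Int) :
    (PySem.List.pyRange (-radius) (radius + 1) 1).flatMap
        (fun dy => if 0 ≤ cy + dy ∧ cy + dy < h_ then pvRow cx cy radius w (cy + dy) else [])
      = (PySem.List.pyRange (max 0 (cy - radius)) (min h_ (cy + radius + 1)) 1).flatMap
          (pvRow cx cy radius w) := by
  have hshift : (PySem.List.pyRange (-radius) (radius + 1) 1).flatMap
        (fun dy => if 0 ≤ cy + dy ∧ cy + dy < h_ then pvRow cx cy radius w (cy + dy) else [])
      = (PySem.List.pyRange (cy + -radius) (cy + (radius + 1)) 1).flatMap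
          (fun y => if 0 ≤ y ∧ y < h_ then pvRow cx cy radius w y else []) := by
    rw [← pvShiftRange cy, List.flatMap_map]
  rw [hshift]
  have hsplit : (PySem.List.pyRange (cy + -radius) (cy + (radius + 1)) 1).flatMap
        (fun y => if 0 ≤ y ∧ y < h_ then pvRow cx cy radius w y else [])
      = ((PySem.List.pyRange (cy + -radius) (cy + (radius + 1)) 1).filter
          (fun y => decide (0 ≤ y ∧ y < h_))).flatMap (pvRow cx cy radius w) := by
    generalize PySem.List.pyRange (cy + -radius) (cy + (radius + 1)) 1 = l
    induction l with
    | nil => rfl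
    | cons y t ih =>
      by_cases hy : 0 ≤ y ∧ y < h_
      · simp [hy, ih]
      · simp [hy, ih]
  rw [hsplit, pvFilterRange _ _ 0 h_ _ (by intro x; simp)]
  have e1 : max (cy + -radius) 0 = max 0 (cy - radius) := by omega
  have e2 : min (cy + (radius + 1)) h_ = min h_ (cy + radius + 1) := by omega
  rw [e1, e2]

-- ===== VERDICT (by name: the statement is the Claim_ definition above) =====
theorem disc_cells_py_spec : Claim_equal_disc_cells_py := by
  intro center radius w h_ _
  unfold Spec_disc_cells_py disc_cells_py disc_cells_py_alt
  obtain ⟨cx, cy⟩ := center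
  simp only []
  -- rewrite A's nested loop
  have hA : (PySem.List.pyRange (-radius) (radius + 1) 1).foldl (fun out dy =>
      (PySem.List.pyRange (-radius) (radius + 1) 1).foldl (fun out dx =>
        if |dx| + |dy| ≤ radius then
          if 0 ≤ cx + dx ∧ cx + dx < w ∧ 0 ≤ cy + dy ∧ cy + dy < h_ then PySem.Set.add out (cx + dx, cy + dy) else out
        else out) out) PySem.Set.empty
      = (PySem.List.pyRange (-radius) (radius + 1) 1).foldl (fun out dy =>
          ((if 0 ≤ cy + dy ∧ cy + dy < h_ then pvRow cx cy radius w (cy + dy) else [])).foldl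
            PySem.Set.add out) PySem.Set.empty := by
    apply PySem.List.foldl_congr_mem
    intro out dy _
    have hbody : (fun (out : List (Int × Int)) dx =>
        if |dx| + |dy| ≤ radius then
          if 0 ≤ cx + dx ∧ cx + dx < w ∧ 0 ≤ cy + dy ∧ cy + dy < h_ then PySem.Set.add out (cx + dx, cy + dy) else out
        else out)
        = (fun (out : List (Int × Int)) dx =>
          if (decide (|dx| + |dy| ≤ radius ∧ 0 ≤ cx + dx ∧ cx + dx < w ∧ 0 ≤ cy + dy ∧ cy + dy < h_)) = true
          then PySem.Set.add out (cx + dx, cy + dy) else out) := by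
      funext out dx
      by_cases h1 : |dx| + |dy| ≤ radius
      · by_cases h2 : 0 ≤ cx + dx ∧ cx + dx < w ∧ 0 ≤ cy + dy ∧ cy + dy < h_
        · simp [h1, h2]
        · simp [h1, h2]
      · simp [h1]
    rw [hbody, pvFoldIf, pvRowA cx cy radius w h_ dy]
  rw [hA]
  -- rewrite B's inner loop as a fold over the mapped row
  have hB : (PySem.List.pyRange (max 0 (cy - radius)) (min h_ (cy + radius + 1)) 1).foldl (fun out y =>
      (PySem.List.pyRange (max 0 (cx - (radius - |y - cy|))) (min w (cx + (radius - |y - cy|) + 1)) 1).foldl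
        (fun out x => PySem.Set.add out (x, y)) out) PySem.Set.empty
      = (PySem.List.pyRange (max 0 (cy - radius)) (min h_ (cy + radius + 1)) 1).foldl (fun out y =>
          (pvRow cx cy radius w y).foldl PySem.Set.add out) PySem.Set.empty := by
    apply PySem.List.foldl_congr_mem
    intro out y _
    unfold pvRow
    rw [List.foldl_map]
  rw [hB]
  -- both are flatMaps
  have hrowsA : ∀ y, (if 0 ≤ y ∧ y < h_ then pvRow cx cy radius w y else []).Nodup := by
    intro y; split
    · exact pvRowNodup cx cy radius w y
    · exact List.nodup_nil
  have hpinA : ∀ y p, p ∈ (if 0 ≤ y ∧ y < h_ then pvRow cx cy radius w y else []) → p.2 = y := by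
    intro y p hp
    split at hp
    · exact pvRowPin cx cy radius w y p hp
    · exact absurd hp List.not_mem_nil
  have hndA : ((PySem.List.pyRange (-radius) (radius + 1) 1).flatMap
      (fun dy => if 0 ≤ cy + dy ∧ cy + dy < h_ then pvRow cx cy radius w (cy + dy) else [])).Nodup := by
    have := pvFlatMapEq cx cy radius w h_
    rw [this]
    exact pvFlatMapNodup _ (pvRowNodup cx cy radius w) (pvRowPin cx cy radius w)
      _ (PySem.List.nodup_pyRange_one _ _)
  have hndB : ((PySem.List.pyRange (max 0 (cy - radius)) (min h_ (cy + radius + 1)) 1).flatMap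
      (pvRow cx cy radius w)).Nodup :=
    pvFlatMapNodup _ (pvRowNodup cx cy radius w) (pvRowPin cx cy radius w)
      _ (PySem.List.nodup_pyRange_one _ _)
  -- the A-side outer fold, reindexed from dy to y, is handled by pvFoldRows directly on the dy list
  rw [pvFoldRows _ _ _ hndA (by intro a _ h; exact absurd h List.not_mem_nil)]
  rw [pvFoldRows _ _ _ hndB (by intro a _ h; exact absurd h List.not_mem_nil)]
  simp only [PySem.Set.empty, List.nil_append]
  exact pvFlatMapEq cx cy radius w h_
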